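-- pv_equiv track=rewrite | github.com/Cyril-44/C-Cpp | templates/LyndonDivide_duval.py | duval
-- ===== SOURCE A (Python) =====
-- def duval(s):
--     n, i = len(s), 0
--     factorization = []
--     while i < n:
--         j, k = i + 1, i
--         while j < n and s[k] <= s[j]:
--             if s[k] < s[j]:
--                 k = i
--             else:
--                 k += 1
--             j += 1
--         while i <= k:
--             factorization.append(s[i : i + j - k])
--             i += j - k
--     return factorization
-- ===== SOURCE B (Python) =====
-- def _is_lyndon(w):
--     return all(w < w[x:] for x in range(1, len(w)))
--
--
-- def duval(s):
--     n = len(s)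
--     factorization = []
--     i = 0
--     while i < n:
--         L = n - i
--         while L > 1 and not _is_lyndon(s[i : i + L]):
--             L -= 1
--         factorization.append(s[i : i + L])
--         i += L
--     return factorization
-- ===== Notes on version B (the rewrite author's own statement) =====
-- stated objective: alternative
-- what changed: Replaces Duval's single incremental pass (tracking the candidate period with indices j,k and emitting a run of factors per inner-loop exit) by the naive greedy: at each position scan candidate lengths downward and take the longest prefix that passes a direct definitional Lyndon test (string strictly smaller than all its proper suffixes, via slicing).
import Mathlib
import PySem

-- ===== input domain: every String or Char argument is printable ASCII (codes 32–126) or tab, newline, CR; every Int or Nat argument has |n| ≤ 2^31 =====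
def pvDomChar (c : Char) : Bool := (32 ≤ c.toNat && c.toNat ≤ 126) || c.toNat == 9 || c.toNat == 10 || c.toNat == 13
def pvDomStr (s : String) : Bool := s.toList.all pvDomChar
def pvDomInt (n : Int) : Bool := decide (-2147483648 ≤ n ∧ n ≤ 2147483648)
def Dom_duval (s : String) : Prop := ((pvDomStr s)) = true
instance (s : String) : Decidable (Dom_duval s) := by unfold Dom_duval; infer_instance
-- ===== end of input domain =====

-- B re-implements the Lyndon factorization by the naive greedy longest-Lyndon-prefix method
-- (direct definitional Lyndon test) instead of Duval's incremental period-tracking pass;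
-- same return value, structurally different algorithm (objective: alternative, not faster).

-- ===== PORT A =====
-- every index A reads is in range, so getD is exact there
def pvGd (l : List Char) (x : Nat) : Char := l.getD x (Char.ofNat 0)

-- A's inner loop `while j < n and s[k] <= s[j]: ...`; the fuel argument only makes the
-- recursion structural (it never runs out on the calls made below)
def aInner (l : List Char) (fuel i j k : Nat) : Nat × Nat :=
  match fuel with
  | 0 => (j, k)
  | fuel' + 1 =>
    if j < l.length ∧ pvGd l k ≤ pvGd l j then
      if pvGd l k < pvGd l j then aInner l fuel' i (j+1) i
      else aInner l fuel' i (j+1) (k+1)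
    else (j, k)

-- A's emission loop `while i <= k: factorization.append(s[i:i+j-k]); i += j-k`
-- (same fuel guard; the guard `k < j` always holds when called)
def aMid (l : List Char) (fuel j k i : Nat) (acc : List String) : Nat × List String :=
  match fuel with
  | 0 => (i, acc)
  | fuel' + 1 =>
    if i ≤ k ∧ k < j then
      aMid l fuel' j k (i + (j - k)) (acc ++ [String.ofList ((l.drop i).take (j - k))])
    else (i, acc)

-- A's outer loop `while i < n: ...`
def aOuter (l : List Char) (fuel i : Nat) (acc : List String) : List String :=
  match fuel with
  | 0 => acc
  | fuel' + 1 =>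
    if i < l.length then
      aOuter l fuel'
        (aMid l (l.length + 1) (aInner l (l.length + 1) i (i+1) i).1
          (aInner l (l.length + 1) i (i+1) i).2 i acc).1
        (aMid l (l.length + 1) (aInner l (l.length + 1) i (i+1) i).1
          (aInner l (l.length + 1) i (i+1) i).2 i acc).2
    else acc

def duval (s : String) : List String := aOuter s.toList (s.toList.length + 1) 0 []

-- ===== PORT B =====
-- Python's `<` on strings, over char lists (exact on all strings)
def pvLlt : List Char → List Char → Bool
  | _, [] => false
  | [], _ :: _ => true
  | a :: x, b :: y => a < b || (a == b && pvLlt x y)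

-- `_is_lyndon(w)`: w is strictly smaller than each of its proper suffixes
def pvLynB (w : List Char) : Bool :=
  (List.range' 1 (w.length - 1)).all (fun x => pvLlt w (w.drop x))

-- B's inner loop `L = n - i; while L > 1 and not _is_lyndon(s[i:i+L]): L -= 1`
-- (structural recursion on L; `L ≤ 1` is split into the patterns 0 and 1)
def bFind (l : List Char) (i : Nat) (L : Nat) : Nat :=
  match L with
  | 0 => 1
  | 1 => 1
  | L' + 2 =>
    if pvLynB ((l.drop i).take (L' + 2)) then L' + 2 else bFind l i (L' + 1)

-- B's outer loop (same fuel guard as A's)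
def bLoop (l : List Char) (fuel i : Nat) (acc : List String) : List String :=
  match fuel with
  | 0 => acc
  | fuel' + 1 =>
    if i < l.length then
      bLoop l fuel' (i + bFind l i (l.length - i))
        (acc ++ [String.ofList ((l.drop i).take (bFind l i (l.length - i)))])
    else acc

def duval_alt (s : String) : List String := bLoop s.toList (s.toList.length + 1) 0 []

-- ===== PRECONDITION & SPEC =====
def Spec_duval (s : String) (out : List String) : Prop := out = duval_alt s
instance (s : String) (out : List String) : Decidable (Spec_duval s out) := by unfold Spec_duval; infer_instance

-- ===== CLAIM (what is proved, stated in full; the proofs are below) =====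
def Claim_equal_duval : Prop := ∀ (s : String), Dom_duval s → Spec_duval s (duval s)

-- ===== LEMMAS AND PROOFS =====

-- lexicographic characterisation of pvLlt
def LexSpec (x y : List Char) : Prop :=
  (x.length < y.length ∧ ∀ t, t < x.length → pvGd x t = pvGd y t) ∨
  (∃ d, d < x.length ∧ d < y.length ∧ (∀ t, t < d → pvGd x t = pvGd y t) ∧ pvGd x d < pvGd y d)

theorem gd_cons_succ (a : Char) (xs : List Char) (t : Nat) :
    pvGd (a :: xs) (t + 1) = pvGd xs t := rfl

theorem pvLlt_iff (x y : List Char) : pvLlt x y = true ↔ LexSpec x y := by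
  induction x generalizing y with
  | nil =>
    cases y with
    | nil => simp [pvLlt, LexSpec]
    | cons b ys => simp [pvLlt, LexSpec]
  | cons a xs ih =>
    cases y with
    | nil => simp [pvLlt, LexSpec]
    | cons b ys =>
      simp only [pvLlt, Bool.or_eq_true, Bool.and_eq_true, beq_iff_eq, decide_eq_true_eq]
      rw [ih]
      constructor
      · rintro (hab | ⟨hab, h⟩)
        · exact Or.inr ⟨0, by simp, by simp, by intro t ht; omega, hab⟩
        · rcases h with ⟨hlen, hagree⟩ | ⟨d, hd1, hd2, hagree, hlt⟩
          · refine Or.inl ⟨by simpa using hlen, ?_⟩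
            intro t ht
            cases t with
            | zero => simpa [pvGd] using hab
            | succ t => rw [gd_cons_succ, gd_cons_succ]; exact hagree t (by simpa using ht)
          · refine Or.inr ⟨d + 1, by simpa using hd1, by simpa using hd2, ?_, by
              rw [gd_cons_succ, gd_cons_succ]; exact hlt⟩
            intro t ht
            cases t with
            | zero => simpa [pvGd] using hab
            | succ t => rw [gd_cons_succ, gd_cons_succ]; exact hagree t (by omega)
      · rintro (⟨hlen, hagree⟩ | ⟨d, hd1, hd2, hagree, hlt⟩)
        · have hab : a = b := by simpa [pvGd] using hagree 0 (by simp)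
          refine Or.inr ⟨hab, Or.inl ⟨by simpa using hlen, ?_⟩⟩
          intro t ht
          have := hagree (t + 1) (by simpa using ht)
          rwa [gd_cons_succ, gd_cons_succ] at this
        · cases d with
          | zero => exact Or.inl (by simpa [pvGd] using hlt)
          | succ d =>
            have hab : a = b := by simpa [pvGd] using hagree 0 (by omega)
            refine Or.inr ⟨hab, Or.inr ⟨d, by simpa using hd1, by simpa using hd2, ?_, by
              rw [gd_cons_succ, gd_cons_succ] at hlt; exact hlt⟩⟩
            intro t ht
            have := hagree (t + 1) (by omega)
            rwa [gd_cons_succ, gd_cons_succ] at this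

-- Lyndon word predicate (specification level)
def IsLyndon (w : List Char) : Prop :=
  w ≠ [] ∧ ∀ x, 0 < x → x < w.length → pvLlt w (w.drop x) = true

theorem lynB_iff (w : List Char) : pvLynB w = true ↔ ∀ x, 0 < x → x < w.length → pvLlt w (w.drop x) = true := by
  unfold pvLynB
  rw [List.all_eq_true]
  constructor
  · intro h x hx1 hx2; exact h x (by rw [List.mem_range'_1]; omega)
  · intro h x hx; rw [List.mem_range'_1] at hx; exact h x (by omega) (by omega)

theorem gd_drop (l : List Char) (i t : Nat) : pvGd (l.drop i) t = pvGd l (i + t) := by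
  simp [pvGd, List.getD, List.getElem?_drop]

theorem gd_take (l : List Char) (m t : Nat) (h : t < m) : pvGd (l.take m) t = pvGd l t := by
  simp [pvGd, List.getD, h]

theorem gd_seg (l : List Char) (i m t : Nat) (h : t < m) :
    pvGd ((l.drop i).take m) t = pvGd l (i + t) := by
  rw [gd_take _ _ _ h, gd_drop]

theorem gd_eq_getElem (l : List Char) (t : Nat) (h : t < l.length) : pvGd l t = l[t] := by
  simp [pvGd, List.getD, List.getElem?_eq_getElem h]

theorem len_seg (l : List Char) (i m : Nat) :
    ((l.drop i).take m).length = min m (l.length - i) := by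
  simp

-- full periodicity from the one-step period property
theorem per_all (l : List Char) (i j m : Nat) (hm : 0 < m)
    (hper : ∀ x, i + m ≤ x → x < j → pvGd l x = pvGd l (x - m)) :
    ∀ t, t < j - i → pvGd l (i + t) = pvGd l (i + t % m) := by
  intro t
  induction t using Nat.strong_induction_on with
  | _ t ih =>
    intro ht
    by_cases h : t < m
    · rw [Nat.mod_eq_of_lt h]
    · have e1 : pvGd l (i + t) = pvGd l (i + (t - m)) := by
        have := hper (i + t) (by omega) (by omega)
        rwa [show i + t - m = i + (t - m) from by omega] at this
      rw [e1, ih (t - m) (by omega) (by omega),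
        show (t - m) % m = t % m from (Nat.mod_eq_sub_mod (by omega)).symm]

-- Duval's key lemma: extending a periodic prefix by a strictly larger character gives a Lyndon word
theorem lyndon_ext (l : List Char) (i j k : Nat)
    (hik : i ≤ k) (hkj : k < j) (hjn : j < l.length)
    (hw : IsLyndon ((l.drop i).take (j - k)))
    (hper : ∀ x, i + (j - k) ≤ x → x < j → pvGd l x = pvGd l (x - (j - k)))
    (hc : pvGd l k < pvGd l j) :
    IsLyndon ((l.drop i).take (j + 1 - i)) := by
  set m := j - k with hmdef
  have hm : 0 < m := by omega
  have hmle : m ≤ j - i := by omega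
  have PER := per_all l i j m hm hper
  have hwlen : ((l.drop i).take m).length = m := by rw [len_seg]; omega
  have hwg : ∀ t, t < m → pvGd ((l.drop i).take m) t = pvGd l (i + t) := by
    intro t ht; exact gd_seg l i m t ht
  have hrho : pvGd l (i + (j - i) % m) < pvGd l j := by
    have a1 := PER (j - i - m) (by omega)
    have e1 : (j - i - m) % m = (j - i) % m := (Nat.mod_eq_sub_mod (by omega)).symm
    rw [e1] at a1
    have hk : k = i + (j - i - m) := by omega
    rw [hk] at hc
    rwa [a1] at hc
  have hrholt : (j - i) % m < m := Nat.mod_lt _ hm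
  have hulen : ((l.drop i).take (j + 1 - i)).length = j + 1 - i := by rw [len_seg]; omega
  have hug : ∀ t, t < j + 1 - i → pvGd ((l.drop i).take (j+1-i)) t = pvGd l (i + t) := by
    intro t ht; exact gd_seg l i (j+1-i) t ht
  refine ⟨?_, ?_⟩
  · intro hnil; rw [hnil] at hulen; simp at hulen; omega
  intro x hx0 hxlen
  rw [hulen] at hxlen
  have hvg : ∀ t, x + t < j + 1 - i → pvGd (((l.drop i).take (j+1-i)).drop x) t = pvGd l (i + x + t) := by
    intro t ht
    rw [gd_drop, hug (x + t) ht, Nat.add_assoc]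
  have hvlen : (((l.drop i).take (j+1-i)).drop x).length = j + 1 - i - x := by
    simp [hulen]
  rw [pvLlt_iff]
  suffices hD : ∃ d, d ≤ j - i - x ∧ (∀ t, t < d → pvGd l (i+t) = pvGd l (i+x+t)) ∧
      pvGd l (i+d) < pvGd l (i+x+d) by
    obtain ⟨d, hd1, hagree, hlt⟩ := hD
    refine Or.inr ⟨d, by rw [hulen]; omega, by rw [hvlen]; omega, ?_, ?_⟩
    · intro t ht
      rw [hug t (by omega), hvg t (by omega)]
      exact hagree t ht
    · rw [hug d (by omega), hvg d (by omega)]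
      exact hlt
  by_cases hr : x % m = 0
  · -- aligned suffix: first difference at the closing character l[j]
    refine ⟨j - i - x, le_refl _, ?_, ?_⟩
    · intro t ht
      have a1 := PER t (by omega)
      have a2 := PER (x + t) (by omega)
      have e : (x + t) % m = t % m := by
        rw [Nat.add_mod, hr, Nat.zero_add, Nat.mod_mod_of_dvd t dvd_rfl]
      rw [a1, show i + x + t = i + (x + t) from by omega, a2, e]
    · have a1 := PER (j - i - x) (by omega)
      have hdm : (j - i - x) % m = (j - i) % m := by
        have e1 : (j - i) % m = (x + (j - i - x)) % m := by congr 1; omega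
        rw [e1, Nat.add_mod, hr, Nat.zero_add, Nat.mod_mod_of_dvd _ dvd_rfl]
      rw [show i + x + (j - i - x) = j from by omega, a1, hdm]
      exact hrho
  · -- misaligned suffix: use w's Lyndon property at shift x % m
    have hxm : 0 < x % m := Nat.pos_of_ne_zero hr
    have hxmlt : x % m < m := Nat.mod_lt _ hm
    have hly := hw.2 (x % m) hxm (by rw [hwlen]; exact hxmlt)
    rw [pvLlt_iff] at hly
    rcases hly with ⟨hlen, _⟩ | ⟨d0, hd01, hd02, hagree0, hlt0⟩
    · rw [List.length_drop, hwlen] at hlen; omega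
    · rw [hwlen] at hd01
      have hd02' : d0 < m - x % m := by
        rw [List.length_drop, hwlen] at hd02; omega
      have agree0 : ∀ t, t < d0 → pvGd l (i + t) = pvGd l (i + (x % m + t)) := by
        intro t ht
        have e := hagree0 t ht
        rw [gd_drop] at e
        rw [hwg t (by omega), hwg (x % m + t) (by omega)] at e
        exact e
      have lt0 : pvGd l (i + d0) < pvGd l (i + (x % m + d0)) := by
        rw [gd_drop] at hlt0
        rw [hwg d0 (by omega), hwg (x % m + d0) (by omega)] at hlt0
        exact hlt0
      refine ⟨min d0 (j - i - x), by omega, ?_, ?_⟩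
      · intro t ht
        have a2 := PER (x + t) (by omega)
        have hxt : (x + t) % m = x % m + t := by
          rw [Nat.add_mod, Nat.mod_eq_of_lt (show t < m by omega),
            Nat.mod_eq_of_lt (by omega)]
        rw [show i + x + t = i + (x + t) from by omega, a2, hxt]
        exact agree0 t (by omega)
      · rcases Nat.lt_or_ge (x + min d0 (j-i-x)) (j - i) with hB | hB
        · have hdd : min d0 (j - i - x) = d0 := by omega
          have a2 := PER (x + d0) (by omega)
          have hxt : (x + d0) % m = x % m + d0 := by
            rw [Nat.add_mod, Nat.mod_eq_of_lt (show d0 < m by omega),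
              Nat.mod_eq_of_lt (by omega)]
          rw [hdd, show i + x + d0 = i + (x + d0) from by omega, a2, hxt]
          exact lt0
        · have hxd : x + min d0 (j - i - x) = j - i := by omega
          have hrho2 : x % m + min d0 (j - i - x) = (j - i) % m := by
            have h1 : (j - i) % m = (x + min d0 (j - i - x)) % m := by rw [hxd]
            have h2 : (x + min d0 (j - i - x)) % m = (x % m + min d0 (j - i - x)) % m := by
              rw [Nat.add_mod, Nat.mod_eq_of_lt (show min d0 (j - i - x) < m by omega)]
            have h3 : x % m + min d0 (j - i - x) < m := by omega
            rw [h1, h2, Nat.mod_eq_of_lt h3]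
          have hle : pvGd l (i + min d0 (j - i - x)) ≤ pvGd l (i + (x % m + min d0 (j - i - x))) := by
            rcases Nat.lt_or_ge (min d0 (j - i - x)) d0 with hdd | hdd
            · exact le_of_eq (agree0 _ hdd)
            · rw [show min d0 (j - i - x) = d0 from by omega]
              exact le_of_lt lt0
          rw [show i + x + min d0 (j - i - x) = j from by omega]
          calc pvGd l (i + min d0 (j - i - x))
              ≤ pvGd l (i + (x % m + min d0 (j - i - x))) := hle
            _ = pvGd l (i + (j - i) % m) := by rw [hrho2]
            _ < pvGd l j := hrho

-- invariant of A's inner loop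
def DuvInv (l : List Char) (i j k : Nat) : Prop :=
  i ≤ k ∧ k < j ∧ j ≤ l.length ∧
  IsLyndon ((l.drop i).take (j - k)) ∧
  ∀ x, i + (j - k) ≤ x → x < j → pvGd l x = pvGd l (x - (j - k))

theorem Inv_init (l : List Char) (i : Nat) (h : i < l.length) : DuvInv l i (i+1) i := by
  refine ⟨le_refl i, by omega, by omega, ⟨?_, ?_⟩, ?_⟩
  · have hl : ((l.drop i).take (i+1-i)).length = 1 := by rw [len_seg]; omega
    intro hnil; rw [hnil] at hl; simp at hl
  · intro x hx1 hx2
    rw [len_seg] at hx2; omega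
  · intro x hx1 hx2; omega

theorem aInner_bounds (l : List Char) (i : Nat) : ∀ fuel j k, i ≤ k → k < j →
    i ≤ (aInner l fuel i j k).2 ∧ (aInner l fuel i j k).2 < (aInner l fuel i j k).1 := by
  intro fuel
  induction fuel with
  | zero => intro j k h1 h2; exact ⟨h1, h2⟩
  | succ f ih =>
    intro j k h1 h2
    simp only [aInner]
    split_ifs with h hlt
    · exact ih (j+1) i (le_refl i) (by omega)
    · exact ih (j+1) (k+1) (by omega) (by omega)
    · exact ⟨h1, h2⟩

theorem aInner_spec (l : List Char) (i : Nat) : ∀ fuel j k, DuvInv l i j k →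
    l.length - j < fuel →
    DuvInv l i (aInner l fuel i j k).1 (aInner l fuel i j k).2 ∧
    ((aInner l fuel i j k).1 = l.length ∨
      pvGd l (aInner l fuel i j k).1 < pvGd l (aInner l fuel i j k).2) := by
  intro fuel
  induction fuel with
  | zero => intro j k hI hf; exact absurd hf (Nat.not_lt_zero _)
  | succ f ih =>
    intro j k hI hf
    simp only [aInner]
    split_ifs with h hlt
    · apply ih
      · obtain ⟨h1, h2, h3, h4, h5⟩ := hI
        exact ⟨le_refl i, by omega, by omega, lyndon_ext l i j k h1 h2 h.1 h4 h5 hlt,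
          by intro x hx1 hx2; exact absurd hx2 (by omega)⟩
      · omega
    · apply ih
      · obtain ⟨h1, h2, h3, h4, h5⟩ := hI
        have hm : j + 1 - (k + 1) = j - k := by omega
        refine ⟨by omega, by omega, by omega, by rwa [hm], ?_⟩
        intro x hx1 hx2
        rw [hm] at hx1 ⊢
        rcases Nat.lt_or_ge x j with hx | hx
        · exact h5 x hx1 hx
        · have hxj : x = j := by omega
          rw [hxj, show j - (j - k) = k from by omega]
          exact (le_antisymm h.2 (not_lt.mp hlt)).symm
      · omega
    · refine ⟨hI, ?_⟩
      by_cases hj : j < l.length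
      · exact Or.inr (not_le.mp (not_and.mp h hj))
      · exact Or.inl (by have := hI.2.2.1; omega)

-- the emitted block at any aligned position r equals the Lyndon root w
theorem seg_shift (l : List Char) (i j m r : Nat) (hm : 0 < m) (hir : i ≤ r)
    (hmod : (r - i) % m = 0) (hrj : r + m ≤ j) (hjn : j ≤ l.length)
    (hper : ∀ x, i + m ≤ x → x < j → pvGd l x = pvGd l (x - m)) :
    (l.drop r).take m = (l.drop i).take m := by
  have hlr : ((l.drop r).take m).length = m := by rw [len_seg]; omega
  have hli : ((l.drop i).take m).length = m := by rw [len_seg]; omega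
  apply List.ext_getElem (by omega)
  intro t h1 h2
  rw [hlr] at h1
  have e1 : pvGd l (r + t) = pvGd l (i + t) := by
    have a1 := per_all l i j m hm hper (r - i + t) (by omega)
    have a2 := per_all l i j m hm hper t (by omega)
    have em : (r - i + t) % m = t % m := by
      rw [Nat.add_mod, hmod, Nat.zero_add, Nat.mod_mod_of_dvd t dvd_rfl]
    rw [show r + t = i + (r - i + t) from by omega, a1, em, ← a2]
  have g1 : ((l.drop r).take m)[t] = l[r + t]'(by omega) := by
    simp [List.getElem_take, List.getElem_drop]
  have g2 : ((l.drop i).take m)[t] = l[i + t]'(by omega) := by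
    simp [List.getElem_take, List.getElem_drop]
  rw [g1, g2, ← gd_eq_getElem l (r+t) (by omega), ← gd_eq_getElem l (i+t) (by omega), e1]

-- no Lyndon prefix longer than m exists at an aligned position r ≤ k
theorem no_long_lyndon (l : List Char) (i j k r : Nat)
    (hI : DuvInv l i j k)
    (hexit : j = l.length ∨ pvGd l j < pvGd l k)
    (hir : i ≤ r) (hrk : r ≤ k) (hmod : (r - i) % (j - k) = 0) :
    ∀ L, j - k < L → L ≤ l.length - r → ¬ IsLyndon ((l.drop r).take L) := by
  obtain ⟨h1, h2, h3, h4, h5⟩ := hI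
  set m := j - k with hmdef
  have hm : 0 < m := by omega
  have PER := per_all l i j m hm h5
  intro L hL1 hL2 hLy
  have hulen : ((l.drop r).take L).length = L := by rw [len_seg]; omega
  have hseg : ∀ t, t < L → pvGd ((l.drop r).take L) t = pvGd l (r + t) := by
    intro t ht; exact gd_seg l r L t ht
  have hmod0 : ∀ a b : Nat, a % m = 0 → (a + b) % m = b % m := by
    intro a b ha; rw [Nat.add_mod, ha, Nat.zero_add, Nat.mod_mod_of_dvd b dvd_rfl]
  rcases le_or_gt (r + L) j with hcase | hcase
  · -- the candidate lies inside the periodic zone, so it is bordered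
    have hly2 := hLy.2 m hm (by rw [hulen]; omega)
    rw [pvLlt_iff] at hly2
    rcases hly2 with ⟨hlen, _⟩ | ⟨d, hd1, hd2, hagree, hlt⟩
    · rw [List.length_drop, hulen] at hlen; omega
    · rw [hulen] at hd1
      rw [List.length_drop, hulen] at hd2
      rw [gd_drop] at hlt
      rw [hseg d (by omega), hseg (m + d) (by omega)] at hlt
      have e : pvGd l (r + (m + d)) = pvGd l (r + d) := by
        have := h5 (r + (m + d)) (by omega) (by omega)
        rwa [show r + (m + d) - m = r + d from by omega] at this
      rw [e] at hlt
      exact lt_irrefl _ hlt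
  · -- the candidate sticks out past j: contradiction with the exit comparison
    have hjn : j < l.length := by omega
    have hc : pvGd l j < pvGd l k := by
      rcases hexit with he | he
      · exact absurd hjn (by omega)
      · exact he
    set rho := (j - i) % m with hrhodef
    have hrholt : rho < m := Nat.mod_lt _ hm
    have hky : pvGd l k = pvGd l (i + rho) := by
      have a1 := PER (j - i - m) (by omega)
      have e1 : (j - i - m) % m = rho := (Nat.mod_eq_sub_mod (by omega)).symm
      rw [show k = i + (j - i - m) from by omega, a1, e1]
    have e1 : (j - r) % m = rho := by
      rw [hrhodef, show j - i = (r - i) + (j - r) from by omega, hmod0 (r - i) (j - r) hmod]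
    have hxs0 : (j - r - rho) % m = 0 := by
      have hdm := Nat.div_add_mod (j - r) m
      rw [e1] at hdm
      rw [show j - r - rho = m * ((j - r) / m) from by omega, Nat.mul_mod_right]
    have hmlejr : m ≤ j - r := by omega
    have hchar : ∀ t, t < L → r + t < j → pvGd ((l.drop r).take L) t = pvGd l (i + t % m) := by
      intro t ht htj
      rw [hseg t ht, show r + t = i + ((r - i) + t) from by omega,
        PER ((r - i) + t) (by omega), hmod0 (r - i) t hmod]
    have hly2 := hLy.2 (j - r - rho) (by omega) (by rw [hulen]; omega)
    rw [pvLlt_iff] at hly2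
    rcases hly2 with ⟨hlen, _⟩ | ⟨d, hd1, hd2, hagree, hlt⟩
    · rw [List.length_drop, hulen] at hlen; omega
    · rw [hulen] at hd1
      rw [List.length_drop, hulen] at hd2
      rw [gd_drop] at hlt
      rcases Nat.lt_trichotomy d rho with hdr | hdr | hdr
      · have c1 := hchar d (by omega) (by omega)
        have c2 := hchar ((j - r - rho) + d) (by omega) (by omega)
        rw [c1, c2, hmod0 _ d hxs0] at hlt
        exact lt_irrefl _ hlt
      · have c1 := hchar d (by omega) (by omega)
        have c2 : pvGd ((l.drop r).take L) ((j - r - rho) + d) = pvGd l j := by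
          rw [hseg _ (by omega), show r + ((j - r - rho) + d) = j from by omega]
        rw [c1, c2, Nat.mod_eq_of_lt (show d < m from by omega), hdr, ← hky] at hlt
        exact lt_irrefl _ (hlt.trans hc)
      · have hag := hagree rho hdr
        rw [gd_drop] at hag
        have c1 := hchar rho (by omega) (by omega)
        have c2 : pvGd ((l.drop r).take L) ((j - r - rho) + rho) = pvGd l j := by
          rw [hseg _ (by omega), show r + ((j - r - rho) + rho) = j from by omega]
        rw [c1, c2, Nat.mod_eq_of_lt hrholt, ← hky] at hag
        rw [hag] at hc
        exact lt_irrefl _ hc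

theorem bFind_eq (l : List Char) (i j k r : Nat)
    (hI : DuvInv l i j k)
    (hexit : j = l.length ∨ pvGd l j < pvGd l k)
    (hir : i ≤ r) (hrk : r ≤ k) (hmod : (r - i) % (j - k) = 0) :
    bFind l r (l.length - r) = j - k := by
  have h1 := hI.1
  have h2 := hI.2.1
  have h3 := hI.2.2.1
  have h4 := hI.2.2.2.1
  have h5 := hI.2.2.2.2
  have hm : 0 < j - k := by omega
  have hWr : IsLyndon ((l.drop r).take (j - k)) := by
    rw [seg_shift l i j (j - k) r hm hir hmod (by omega) h3 h5]
    exact h4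
  have htrue : pvLynB ((l.drop r).take (j - k)) = true := (lynB_iff _).mpr hWr.2
  have hfalse : ∀ L, j - k < L → L ≤ l.length - r →
      ¬ (pvLynB ((l.drop r).take L) = true) := by
    intro L hL1 hL2 hB
    apply no_long_lyndon l i j k r hI hexit hir hrk hmod L hL1 hL2
    refine ⟨?_, (lynB_iff _).mp hB⟩
    intro hnil
    have hl : ((l.drop r).take L).length = L := by rw [len_seg]; omega
    rw [hnil] at hl
    simp at hl
    omega
  have key : ∀ L, j - k ≤ L → L ≤ l.length - r → bFind l r L = j - k := by
    intro L
    induction L using Nat.strong_induction_on with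
    | _ L ih =>
      match L with
      | 0 => intro hL1 _; omega
      | 1 => intro hL1 _; simp only [bFind]; omega
      | (L' + 2) =>
        intro hL1 hL2
        by_cases he : j - k = L' + 2
        · have ht := htrue
          rw [he] at ht
          simp only [bFind]
          rw [if_pos ht, he]
        · simp only [bFind]
          rw [if_neg (hfalse (L' + 2) (by omega) hL2)]
          exact ih (L' + 1) (by omega) (by omega) (by omega)
  exact key (l.length - r) (by omega) (le_refl _)

theorem bFind_pos (l : List Char) (i : Nat) : ∀ L, 1 ≤ bFind l i L := by
  intro L
  induction L using Nat.strong_induction_on with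
  | _ L ih =>
    match L with
    | 0 => simp [bFind]
    | 1 => simp [bFind]
    | (L' + 2) =>
      simp only [bFind]
      split_ifs with hly
      · omega
      · exact ih (L' + 1) (by omega)

theorem bLoop_fuel (l : List Char) : ∀ f1 f2 i acc, l.length - i < f1 → l.length - i < f2 →
    bLoop l f1 i acc = bLoop l f2 i acc := by
  intro f1
  induction f1 with
  | zero => intro f2 i acc h1 h2; exact absurd h1 (Nat.not_lt_zero _)
  | succ f ih =>
    intro f2 i acc h1 h2
    cases f2 with
    | zero => exact absurd h2 (Nat.not_lt_zero _)
    | succ f2' =>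
      simp only [bLoop]
      by_cases hin : i < l.length
      · rw [if_pos hin, if_pos hin]
        have hp := bFind_pos l i (l.length - i)
        exact ih f2' _ _ (by omega) (by omega)
      · rw [if_neg hin, if_neg hin]

theorem aMid_fst_ge (l : List Char) (j k : Nat) : ∀ fuel i acc, i ≤ (aMid l fuel j k i acc).1 := by
  intro fuel
  induction fuel with
  | zero => intro i acc; exact le_refl i
  | succ f ih =>
    intro i acc
    simp only [aMid]
    split_ifs with h
    · exact le_trans (by omega) (ih (i + (j - k)) _)
    · exact le_refl i

theorem aMid_fst_gt (l : List Char) (j k : Nat) : ∀ fuel i acc, k < j → k + 1 - i ≤ fuel →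
    k < (aMid l fuel j k i acc).1 := by
  intro fuel
  induction fuel with
  | zero => intro i acc hkj hf; simp only [aMid]; omega
  | succ f ih =>
    intro i acc hkj hf
    simp only [aMid]
    split_ifs with h
    · exact ih _ _ hkj (by omega)
    · omega

theorem midsim (l : List Char) (i j k : Nat)
    (hI : DuvInv l i j k)
    (hexit : j = l.length ∨ pvGd l j < pvGd l k) :
    ∀ fuelm r acc fb, k + 1 - r ≤ fuelm → l.length - r < fb → i ≤ r →
      (r - i) % (j - k) = 0 →
      bLoop l fb r acc = bLoop l fb (aMid l fuelm j k r acc).1 (aMid l fuelm j k r acc).2 := by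
  have hkj : k < j := hI.2.1
  have hjn : j ≤ l.length := hI.2.2.1
  intro fuelm
  induction fuelm with
  | zero =>
    intro r acc fb hfm hfb h1 h2
    rfl
  | succ f ih =>
    intro r acc fb hfm hfb h1 h2
    by_cases hrk : r ≤ k
    · have hunf : aMid l (f+1) j k r acc =
          aMid l f j k (r + (j - k)) (acc ++ [String.ofList ((l.drop r).take (j - k))]) := by
        simp only [aMid]
        rw [if_pos ⟨hrk, hkj⟩]
      cases fb with
      | zero => exact absurd hfb (Nat.not_lt_zero _)
      | succ fb' =>
        rw [hunf]
        have hstep : bLoop l (fb' + 1) r acc =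
            bLoop l fb' (r + (j - k)) (acc ++ [String.ofList ((l.drop r).take (j - k))]) := by
          simp only [bLoop]
          rw [if_pos (show r < l.length from by omega),
            bFind_eq l i j k r hI hexit h1 hrk h2]
        rw [hstep,
          ih (r + (j - k)) (acc ++ [String.ofList ((l.drop r).take (j - k))]) fb'
            (by omega) (by omega) (by omega)
            (by rw [show r + (j - k) - i = (r - i) + (j - k) from by omega, Nat.add_mod, h2,
                  Nat.zero_add, Nat.mod_mod_of_dvd _ dvd_rfl, Nat.mod_self])]
        have hge := aMid_fst_ge l j k f (r + (j - k))
          (acc ++ [String.ofList ((l.drop r).take (j - k))])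
        exact bLoop_fuel l fb' (fb' + 1) _ _ (by omega) (by omega)
    · have hunf : aMid l (f+1) j k r acc = (r, acc) := by
        simp only [aMid]
        rw [if_neg (by intro hand; exact hrk hand.1)]
      rw [hunf]

theorem sim (l : List Char) : ∀ fo i acc fb, l.length - i < fo → l.length - i < fb →
    aOuter l fo i acc = bLoop l fb i acc := by
  intro fo
  induction fo with
  | zero => intro i acc fb h1 h2; exact absurd h1 (Nat.not_lt_zero _)
  | succ f ih =>
    intro i acc fb h1 h2
    by_cases hin : i < l.length
    · obtain ⟨hI, hexit⟩ :=
        aInner_spec l i (l.length + 1) (i+1) i (Inv_init l i hin) (by omega)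
      have hb := aInner_bounds l i (l.length + 1) (i+1) i (le_refl i) (by omega)
      have hkj : (aInner l (l.length + 1) i (i+1) i).2 < (aInner l (l.length + 1) i (i+1) i).1 :=
        hb.2
      have hjn : (aInner l (l.length + 1) i (i+1) i).1 ≤ l.length := hI.2.2.1
      have hgt := aMid_fst_gt l (aInner l (l.length + 1) i (i+1) i).1
        (aInner l (l.length + 1) i (i+1) i).2 (l.length + 1) i acc hkj (by omega)
      have hge := aMid_fst_ge l (aInner l (l.length + 1) i (i+1) i).1
        (aInner l (l.length + 1) i (i+1) i).2 (l.length + 1) i acc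
      simp only [aOuter]
      rw [if_pos hin,
        ih (aMid l (l.length + 1) (aInner l (l.length + 1) i (i+1) i).1
              (aInner l (l.length + 1) i (i+1) i).2 i acc).1
           (aMid l (l.length + 1) (aInner l (l.length + 1) i (i+1) i).1
              (aInner l (l.length + 1) i (i+1) i).2 i acc).2 fb (by omega) (by omega)]
      exact (midsim l i (aInner l (l.length + 1) i (i+1) i).1
        (aInner l (l.length + 1) i (i+1) i).2 hI hexit (l.length + 1) i acc fb
        (by omega) (by omega) (le_refl i) (by rw [Nat.sub_self, Nat.zero_mod])).symm
    · simp only [aOuter]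
      cases fb with
      | zero => exact absurd h2 (Nat.not_lt_zero _)
      | succ fb' => simp only [bLoop]; rw [if_neg hin, if_neg hin]

-- ===== VERDICT (by name: the statement is the Claim_ definition above) =====
theorem duval_spec : Claim_equal_duval := by
  intro s _
  unfold Spec_duval duval duval_alt
  exact sim s.toList (s.toList.length + 1) 0 [] (s.toList.length + 1) (by omega) (by omega)
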